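-- pv_equiv track=rewrite | github.com/jinzhao3611/umr-annotation-tool | suggest_sim_words.py | group_together_tuples
-- ===== SOURCE A (Python) =====
-- from collections import defaultdict
-- from typing import List,Tuple, Set, NamedTuple
--
-- def group_together_tuples(lst: List[Tuple[str, str]]):
--     #https://stackoverflow.com/questions/42036188/merging-tuples-if-they-have-one-common-element
--     #    edges = [('c', 'e'), ('c', 'd'), ('a', 'b'), ('d', 'e')]
--     def dfs(adj_list, visited, vertex, result, key):
--         visited.add(vertex)
--         result[key].append(vertex)
--         for neighbor in adj_list[vertex]:
--             if neighbor not in visited: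
--                 dfs(adj_list, visited, neighbor, result, key)
--
--     adj_list = defaultdict(list)
--     for x, y in lst:
--         adj_list[x].append(y)
--         adj_list[y].append(x)
--
--     result = defaultdict(list)
--     visited = set()
--     for vertex in adj_list:
--         if vertex not in visited:
--             dfs(adj_list, visited, vertex, result, vertex)
--     return result.values()  #dict_values([['c', 'e', 'd'], ['a', 'b']])
-- ===== SOURCE B (Python) =====
-- from collections import defaultdict
-- from typing import List, Tuple
--
-- def group_together_tuples(lst: List[Tuple[str, str]]):
--     adj_list = defaultdict(list)
--     for x, y in lst:
--         adj_list[x].append(y)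
--         adj_list[y].append(x)
--
--     visited = set()
--     result = []
--     for vertex in adj_list:
--         if vertex not in visited:
--             component = []
--             stack = [vertex]
--             while stack:
--                 v = stack.pop()
--                 if v in visited:
--                     continue
--                 visited.add(v)
--                 component.append(v)
--                 stack.extend(reversed(adj_list[v]))
--             result.append(component)
--     return result
-- ===== Notes on version B (the rewrite author's own statement) =====
-- stated objective: alternative
-- what changed: A's recursive dfs helper (mutating a shared visited set and a result defaultdict) is replaced by an explicit-stack iterative DFS that pops a vertex, skips it if visited, and pushes its neighbours in reversed order, collecting each component into a plain list; same adjacency build and component/start order.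
import Mathlib
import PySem

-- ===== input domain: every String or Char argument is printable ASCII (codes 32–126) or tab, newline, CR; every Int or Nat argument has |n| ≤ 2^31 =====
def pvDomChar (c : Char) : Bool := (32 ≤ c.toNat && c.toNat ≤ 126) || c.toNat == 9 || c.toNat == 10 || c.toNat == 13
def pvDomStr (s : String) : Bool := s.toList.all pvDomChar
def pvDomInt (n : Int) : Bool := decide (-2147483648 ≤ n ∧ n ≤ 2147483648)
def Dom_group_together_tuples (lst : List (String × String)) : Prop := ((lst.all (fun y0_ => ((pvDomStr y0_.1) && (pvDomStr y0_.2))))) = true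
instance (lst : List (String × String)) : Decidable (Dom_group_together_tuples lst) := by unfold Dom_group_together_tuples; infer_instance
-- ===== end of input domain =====

-- B replaces A's recursive dfs helper by an explicit-stack loop (pop, skip if visited,
-- push neighbours); same adjacency build, same component/start order, same return value.

-- shared adjacency construction (identical in Source A and Source B):
-- adj_list[x].append(y); adj_list[y].append(x) on a defaultdict(list)
def pvAdj (lst : List (String × String)) : PySem.Dict String (List String) :=
  lst.foldl (fun d p =>
    (d.insert p.1 (d.getD p.1 [] ++ [p.2])).insert p.2
      ((d.insert p.1 (d.getD p.1 [] ++ [p.2])).getD p.2 [] ++ [p.1]))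
    PySem.Dict.empty

-- all vertices that can ever be visited (keys and neighbour-list entries); used only
-- as a totality device (fuel for A's dfs, termination measure for B's while loop)
def pvAllV (adj : PySem.Dict String (List String)) : List String :=
  adj.keys ++ adj.values.flatten

-- number of not-yet-visited vertices: the termination measure
def pvMu (adj : PySem.Dict String (List String)) (vis : PySem.Set String) : Nat :=
  (pvAllV adj).countP (fun x => !PySem.Set.contains vis x)

lemma pvCountP_lt {α : Type} (l : List α) (p q : α → Bool)
    (hle : ∀ a ∈ l, p a → q a) (a : α) (ha : a ∈ l) (hq : q a) (hp : ¬ p a) :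
    l.countP p < l.countP q := by
  induction l with
  | nil => cases ha
  | cons b l ih =>
    rw [List.countP_cons, List.countP_cons]
    rcases List.mem_cons.mp ha with rfl | hb
    · have h1 : l.countP p ≤ l.countP q :=
        List.countP_mono_left (fun x hx => hle x (List.mem_cons_of_mem _ hx))
      have hp' : p a = false := Bool.not_eq_true _ ▸ by simpa using hp
      simp [hq, hp']
      omega
    · have h2 : (if p b = true then 1 else 0) ≤ (if q b = true then 1 else 0) := by
        by_cases hb' : p b
        · simp [hb', hle b List.mem_cons_self hb']
        · simp [hb']
      have := ih (fun x hx hpx => hle x (List.mem_cons_of_mem _ hx) hpx) hb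
      omega

lemma pvMu_lt (adj : PySem.Dict String (List String)) {vis vis' : PySem.Set String} {v : String}
    (hv : v ∈ pvAllV adj) (hnv : v ∉ vis) (hsub : ∀ x, x ∈ vis → x ∈ vis') (hv' : v ∈ vis') :
    pvMu adj vis' < pvMu adj vis := by
  exact pvCountP_lt _ _ _
    (fun a _ ha => by
      simp only [Bool.not_eq_eq_eq_not, Bool.not_true,
        PySem.Set.contains_eq_listContains, List.contains_eq_mem,
        decide_eq_false_iff_not] at ha ⊢
      exact fun hva => ha (hsub a hva))
    v hv (by simpa using hnv) (by simpa using hv')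

lemma pvMu_add_eq (adj : PySem.Dict String (List String)) {vis : PySem.Set String} {v : String}
    (h : v ∉ pvAllV adj) : pvMu adj (PySem.Set.add vis v) = pvMu adj vis := by
  apply List.countP_congr
  intro x hx
  have hxv : x ≠ v := fun he => h (he ▸ hx)
  simp only [PySem.Set.contains_eq_listContains, List.contains_eq_mem]
  simp [PySem.Set.mem_add, hxv]

lemma pvGetD_nil (adj : PySem.Dict String (List String)) {v : String}
    (h : v ∉ pvAllV adj) : adj.getD v [] = [] := by
  have hk : v ∉ adj.keys := fun hm => h (List.mem_append_left _ hm)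
  have hc : adj.contains v = false := by
    rw [← Bool.not_eq_true, PySem.Dict.contains_iff_mem_keys adj v]
    exact hk
  exact PySem.Dict.getD_of_not_contains _ _ hc

-- ===== PORT A =====
-- A's recursive dfs, threading the mutated (visited, result) state.
-- result[key].append(vertex) on a defaultdict(list) = insert key (getD key [] ++ [vertex]).
-- The fuel argument is a totality device only; callers pass |pvAllV adj| + 1, which
-- always exceeds the recursion depth (each level visits a fresh vertex of pvAllV).
def pvDfsA (adj : PySem.Dict String (List String)) :
    Nat → PySem.Set String → PySem.Dict String (List String) → String → String →
    PySem.Set String × PySem.Dict String (List String)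
  | 0, visited, result, _, _ => (visited, result)
  | fuel+1, visited, result, vertex, key =>
    (adj.getD vertex []).foldl
      (fun st neighbor =>
        if PySem.Set.contains st.1 neighbor then st
        else pvDfsA adj fuel st.1 st.2 neighbor key)
      (PySem.Set.add visited vertex,
       result.insert key (result.getD key [] ++ [vertex]))

def group_together_tuples (lst : List (String × String)) : List (List String) :=
  ((pvAdj lst).keys.foldl
    (fun st vertex =>
      if PySem.Set.contains st.1 vertex then st
      else pvDfsA (pvAdj lst) ((pvAllV (pvAdj lst)).length + 1) st.1 st.2 vertex vertex)
    (PySem.Set.empty, PySem.Dict.empty)).2.values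

-- ===== PORT B =====
-- Source B's while loop. The Python stack pops from the END and extends with
-- reversed(adj_list[v]); here the stack is kept top-first (head = top of stack), so
-- pop = take the head and that extend = prepend adj.getD v [] in list order.
def pvLoopB (adj : PySem.Dict String (List String)) (visited : PySem.Set String)
    (comp : List String) (stack : List String) : PySem.Set String × List String :=
  match stack with
  | [] => (visited, comp)
  | v :: rest =>
    if PySem.Set.contains visited v then
      pvLoopB adj visited comp rest
    else
      pvLoopB adj (PySem.Set.add visited v) (comp ++ [v]) (adj.getD v [] ++ rest)
termination_by (pvMu adj visited, stack.length)
decreasing_by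
  · exact Prod.Lex.right _ (by simp)
  · rename_i h
    by_cases hv : v ∈ pvAllV adj
    · exact Prod.Lex.left _ _ (pvMu_lt adj hv
        (by simpa [PySem.Set.contains_iff] using h)
        (fun x hx => by simp [PySem.Set.mem_add, hx])
        (by simp [PySem.Set.mem_add]))
    · rw [pvMu_add_eq adj hv, pvGetD_nil adj hv]
      exact Prod.Lex.right _ (by simp)

def group_together_tuples_alt (lst : List (String × String)) : List (List String) :=
  ((pvAdj lst).keys.foldl
    (fun st vertex =>
      if PySem.Set.contains st.1 vertex then st
      else ((pvLoopB (pvAdj lst) st.1 [] [vertex]).1,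
            st.2 ++ [(pvLoopB (pvAdj lst) st.1 [] [vertex]).2]))
    (PySem.Set.empty, ([] : List (List String)))).2

-- ===== PRECONDITION & SPEC =====
def Spec_group_together_tuples (lst : List (String × String)) (out : List (List String)) : Prop := out = group_together_tuples_alt lst
instance (lst : List (String × String)) (out : List (List String)) : Decidable (Spec_group_together_tuples lst out) := by unfold Spec_group_together_tuples; infer_instance

-- ===== CLAIM (what is proved, stated in full; the proofs are below) =====
def Claim_equal_group_together_tuples : Prop := ∀ (lst : List (String × String)), Dom_group_together_tuples lst → Spec_group_together_tuples lst (group_together_tuples lst)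

-- ===== LEMMAS AND PROOFS =====

lemma pvMu_le (adj : PySem.Dict String (List String)) {vis vis' : PySem.Set String}
    (h : ∀ x, x ∈ vis → x ∈ vis') : pvMu adj vis' ≤ pvMu adj vis := by
  apply List.countP_mono_left
  intro x _ hx
  simp only [Bool.not_eq_eq_eq_not, Bool.not_true] at hx ⊢
  simp only [PySem.Set.contains_eq_listContains, List.contains_eq_mem,
    decide_eq_false_iff_not] at hx ⊢
  exact fun hv => hx (h x hv)

-- pure reference dfs: A's traversal, returning the emitted component list instead of
-- threading the result dict (proof helper only)
def pvDfsP (adj : PySem.Dict String (List String)) :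
    Nat → PySem.Set String → String → PySem.Set String × List String
  | 0, vis, _ => (vis, [])
  | fuel+1, vis, v =>
    (adj.getD v []).foldl
      (fun st n =>
        if PySem.Set.contains st.1 n then st
        else ((pvDfsP adj fuel st.1 n).1, st.2 ++ (pvDfsP adj fuel st.1 n).2))
      (PySem.Set.add vis v, [v])

lemma pvDfsP_mono (adj : PySem.Dict String (List String)) :
    ∀ f vis v x, x ∈ vis → x ∈ (pvDfsP adj f vis v).1 := by
  intro f
  induction f with
  | zero => intro vis v x hx; simpa [pvDfsP] using hx
  | succ g ih =>
    intro vis v x hx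
    simp only [pvDfsP]
    have haux : ∀ (ns : List String) (st : PySem.Set String × List String),
        x ∈ st.1 → x ∈ (ns.foldl
          (fun st n =>
            if PySem.Set.contains st.1 n then st
            else ((pvDfsP adj g st.1 n).1, st.2 ++ (pvDfsP adj g st.1 n).2)) st).1 := by
      intro ns
      induction ns with
      | nil => intro st h; exact h
      | cons n ns ihn =>
        intro st h
        simp only [List.foldl_cons]
        by_cases hc : PySem.Set.contains st.1 n
        · rw [if_pos hc]; exact ihn _ h
        · rw [if_neg hc]; exact ihn _ (ih _ _ _ h)
    exact haux _ _ (by simp [PySem.Set.mem_add, hx])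

lemma pvDfsP_mem_self (adj : PySem.Dict String (List String)) (f : Nat)
    (vis : PySem.Set String) (v : String) : v ∈ (pvDfsP adj (f+1) vis v).1 := by
  simp only [pvDfsP]
  have haux : ∀ (ns : List String) (st : PySem.Set String × List String),
      v ∈ st.1 → v ∈ (ns.foldl
        (fun st n =>
          if PySem.Set.contains st.1 n then st
          else ((pvDfsP adj f st.1 n).1, st.2 ++ (pvDfsP adj f st.1 n).2)) st).1 := by
    intro ns
    induction ns with
    | nil => intro st h; exact h
    | cons n ns ihn =>
      intro st h
      simp only [List.foldl_cons]
      by_cases hc : PySem.Set.contains st.1 n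
      · rw [if_pos hc]; exact ihn _ h
      · rw [if_neg hc]; exact ihn _ (pvDfsP_mono adj _ _ _ _ h)
  exact haux _ _ (by simp [PySem.Set.mem_add])

lemma pvMem_getD_allV (adj : PySem.Dict String (List String)) {v n : String}
    (h : n ∈ adj.getD v []) : n ∈ pvAllV adj := by
  by_cases hc : adj.contains v = true
  · have hs : (adj.get? v).isSome := by rw [← PySem.Dict.contains_eq_isSome_get?]; exact hc
    obtain ⟨l, hl⟩ := Option.isSome_iff_exists.mp hs
    have hdg : adj.getD v [] = l := PySem.Dict.getD_of_get?_eq_some _ _ hl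
    have hi : (v, l) ∈ adj.items := PySem.Dict.mem_items_of_get?_eq_some _ hl
    have hlv : l ∈ adj.values := by
      simp only [PySem.Dict.values]
      exact List.mem_map.mpr ⟨(v, l), hi, rfl⟩
    exact List.mem_append_right _ (List.mem_flatten.mpr ⟨l, hlv, hdg ▸ h⟩)
  · rw [PySem.Dict.getD_of_not_contains _ _ (by simpa using hc)] at h
    cases h

lemma pvMu_lt_fuel (adj : PySem.Dict String (List String)) (vis : PySem.Set String) :
    pvMu adj vis < (pvAllV adj).length + 1 :=
  Nat.lt_succ_of_le List.countP_le_length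

lemma pvDfsA_eq (adj : PySem.Dict String (List String)) :
    ∀ f vis (res : PySem.Dict String (List String)) v k,
      v ∈ pvAllV adj → v ∉ vis → pvMu adj vis < f →
      pvDfsA adj f vis res v k =
        ((pvDfsP adj f vis v).1,
         res.insert k (res.getD k [] ++ (pvDfsP adj f vis v).2)) := by
  intro f
  induction f using Nat.strong_induction_on with
  | _ f IH =>
  intro vis res v k hv hnv hmu
  obtain ⟨g, rfl⟩ : ∃ g, f = g + 1 := ⟨f - 1, by omega⟩
  simp only [pvDfsA, pvDfsP]
  have hmu1 : pvMu adj (PySem.Set.add vis v) < g := by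
    have := pvMu_lt adj hv hnv
      (fun x hx => by simp [PySem.Set.mem_add, hx])
      (by simp [PySem.Set.mem_add]) (vis' := PySem.Set.add vis v)
    omega
  have haux : ∀ (ns : List String), (∀ n ∈ ns, n ∈ pvAllV adj) →
      ∀ (vis₁ : PySem.Set String) (c : List String) (res₀ : PySem.Dict String (List String)),
      pvMu adj vis₁ < g →
      ns.foldl
        (fun st neighbor =>
          if PySem.Set.contains st.1 neighbor then st
          else pvDfsA adj g st.1 st.2 neighbor k)
        (vis₁, res₀.insert k (res₀.getD k [] ++ c)) =
      ((ns.foldl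
          (fun st n =>
            if PySem.Set.contains st.1 n then st
            else ((pvDfsP adj g st.1 n).1, st.2 ++ (pvDfsP adj g st.1 n).2))
          (vis₁, c)).1,
       res₀.insert k (res₀.getD k [] ++
         (ns.foldl
            (fun st n =>
              if PySem.Set.contains st.1 n then st
              else ((pvDfsP adj g st.1 n).1, st.2 ++ (pvDfsP adj g st.1 n).2))
            (vis₁, c)).2)) := by
    intro ns
    induction ns with
    | nil => intro _ vis₁ c res₀ _; simp
    | cons n ns ihn =>
      intro hns vis₁ c res₀ hmu₁
      have hn : n ∈ pvAllV adj := hns n List.mem_cons_self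
      have hns' : ∀ m ∈ ns, m ∈ pvAllV adj := fun m hm => hns m (List.mem_cons_of_mem _ hm)
      simp only [List.foldl_cons]
      by_cases hc : PySem.Set.contains vis₁ n
      · simp only [hc, if_true]
        exact ihn hns' vis₁ c res₀ hmu₁
      · simp only [hc, if_false, Bool.false_eq_true]
        have hnn : n ∉ vis₁ := by simpa [PySem.Set.contains_iff] using hc
        rw [IH g (by omega) vis₁ _ n k hn hnn hmu₁]
        rw [PySem.Dict.getD_insert_self, PySem.Dict.insert_insert_self, List.append_assoc]
        have hmu₂ : pvMu adj (pvDfsP adj g vis₁ n).1 < g :=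
          lt_of_le_of_lt (pvMu_le adj (fun x hx => pvDfsP_mono adj g vis₁ n x hx)) hmu₁
        exact ihn hns' _ _ res₀ hmu₂
  exact haux (adj.getD v []) (fun n hn => pvMem_getD_allV adj hn)
    (PySem.Set.add vis v) [v] res hmu1

lemma pvBridge (adj : PySem.Dict String (List String)) :
    ∀ f vis comp stack v, v ∈ pvAllV adj → v ∉ vis → pvMu adj vis < f →
      pvLoopB adj vis comp (v :: stack) =
        pvLoopB adj (pvDfsP adj f vis v).1 (comp ++ (pvDfsP adj f vis v).2) stack := by
  intro f
  induction f using Nat.strong_induction_on with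
  | _ f IH =>
  intro vis comp stack v hv hnv hmu
  obtain ⟨g, rfl⟩ : ∃ g, f = g + 1 := ⟨f - 1, by omega⟩
  have hcv : ¬ PySem.Set.contains vis v = true := by
    simpa [PySem.Set.contains_iff] using hnv
  rw [pvLoopB, if_neg hcv]
  simp only [pvDfsP]
  have hmu1 : pvMu adj (PySem.Set.add vis v) < g := by
    have := pvMu_lt adj hv hnv
      (fun x hx => by simp [PySem.Set.mem_add, hx])
      (by simp [PySem.Set.mem_add]) (vis' := PySem.Set.add vis v)
    omega
  have haux : ∀ (ns : List String), (∀ n ∈ ns, n ∈ pvAllV adj) →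
      ∀ (vis₁ : PySem.Set String) (c comp stack : List String),
      pvMu adj vis₁ < g →
      pvLoopB adj vis₁ (comp ++ c) (ns ++ stack) =
        pvLoopB adj
          (ns.foldl
            (fun st n =>
              if PySem.Set.contains st.1 n then st
              else ((pvDfsP adj g st.1 n).1, st.2 ++ (pvDfsP adj g st.1 n).2))
            (vis₁, c)).1
          (comp ++
            (ns.foldl
              (fun st n =>
                if PySem.Set.contains st.1 n then st
                else ((pvDfsP adj g st.1 n).1, st.2 ++ (pvDfsP adj g st.1 n).2))
              (vis₁, c)).2)
          stack := by
    intro ns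
    induction ns with
    | nil => intro _ vis₁ c comp stack _; simp
    | cons n ns ihn =>
      intro hns vis₁ c comp stack hmu₁
      have hn : n ∈ pvAllV adj := hns n List.mem_cons_self
      have hns' : ∀ m ∈ ns, m ∈ pvAllV adj := fun m hm => hns m (List.mem_cons_of_mem _ hm)
      simp only [List.cons_append, List.foldl_cons]
      by_cases hc : PySem.Set.contains vis₁ n
      · rw [pvLoopB, if_pos hc]
        simp only [hc, if_true]
        exact ihn hns' vis₁ c comp stack hmu₁
      · simp only [hc, if_false, Bool.false_eq_true]
        have hnn : n ∉ vis₁ := by simpa [PySem.Set.contains_iff] using hc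
        rw [IH g (by omega) vis₁ (comp ++ c) (ns ++ stack) n hn hnn hmu₁]
        rw [List.append_assoc]
        have hmu₂ : pvMu adj (pvDfsP adj g vis₁ n).1 < g :=
          lt_of_le_of_lt (pvMu_le adj (fun x hx => pvDfsP_mono adj g vis₁ n x hx)) hmu₁
        exact ihn hns' _ _ comp stack hmu₂
  exact haux (adj.getD v []) (fun n hn => pvMem_getD_allV adj hn)
    (PySem.Set.add vis v) [v] comp stack hmu1

lemma pvTop (adj : PySem.Dict String (List String)) :
    ∀ (ks : List String), (∀ v ∈ ks, v ∈ pvAllV adj) →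
    ∀ (visA : PySem.Set String) (res : PySem.Dict String (List String))
      (out : List (List String)),
      (∀ k', res.contains k' = true → k' ∈ visA) → res.values = out →
      (ks.foldl
        (fun st vertex =>
          if PySem.Set.contains st.1 vertex then st
          else pvDfsA adj ((pvAllV adj).length + 1) st.1 st.2 vertex vertex)
        (visA, res)).1 =
      (ks.foldl
        (fun st vertex =>
          if PySem.Set.contains st.1 vertex then st
          else ((pvLoopB adj st.1 [] [vertex]).1,
                st.2 ++ [(pvLoopB adj st.1 [] [vertex]).2]))
        (visA, out)).1 ∧
      (ks.foldl
        (fun st vertex =>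
          if PySem.Set.contains st.1 vertex then st
          else pvDfsA adj ((pvAllV adj).length + 1) st.1 st.2 vertex vertex)
        (visA, res)).2.values =
      (ks.foldl
        (fun st vertex =>
          if PySem.Set.contains st.1 vertex then st
          else ((pvLoopB adj st.1 [] [vertex]).1,
                st.2 ++ [(pvLoopB adj st.1 [] [vertex]).2]))
        (visA, out)).2 := by
  intro ks
  induction ks with
  | nil => intro _ visA res out _ hval; exact ⟨rfl, hval⟩
  | cons v ks ihk =>
    intro hks visA res out hres hval
    have hv : v ∈ pvAllV adj := hks v List.mem_cons_self
    have hks' : ∀ m ∈ ks, m ∈ pvAllV adj := fun m hm => hks m (List.mem_cons_of_mem _ hm)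
    simp only [List.foldl_cons]
    by_cases hc : PySem.Set.contains visA v
    · simp only [hc, if_true]
      exact ihk hks' visA res out hres hval
    · simp only [hc, if_false, Bool.false_eq_true]
      have hnv : v ∉ visA := by simpa [PySem.Set.contains_iff] using hc
      have hrc : res.contains v = false := by
        by_contra hb
        exact hnv (hres v (by simpa using hb))
      have hA := pvDfsA_eq adj ((pvAllV adj).length + 1) visA res v v hv hnv
        (pvMu_lt_fuel adj visA)
      rw [PySem.Dict.getD_of_not_contains _ _ hrc, List.nil_append] at hA
      have hB : pvLoopB adj visA [] [v] =
          ((pvDfsP adj ((pvAllV adj).length + 1) visA v).1,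
           (pvDfsP adj ((pvAllV adj).length + 1) visA v).2) := by
        rw [pvBridge adj ((pvAllV adj).length + 1) visA [] [] v hv hnv
          (pvMu_lt_fuel adj visA)]
        rw [pvLoopB]
        simp
      rw [hA, hB]
      have hitems := PySem.Dict.items_insert_of_not_contains res
        (pvDfsP adj ((pvAllV adj).length + 1) visA v).2 hrc
      exact ihk hks' _ _ _
        (fun k' hk' => by
          rw [PySem.Dict.contains_insert] at hk'
          rcases (Bool.or_eq_true _ _).mp hk' with h1 | h2
          · have hkv : k' = v := by simpa using h1
            subst hkv
            exact pvDfsP_mem_self adj (pvAllV adj).length visA k'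
          · exact pvDfsP_mono adj _ _ _ _ (hres k' h2))
        (by
          simp only [PySem.Dict.values, hitems, List.map_append, List.map_cons,
            List.map_nil]
          rw [show res.items.map (fun p => p.2) = out from hval])

-- ===== VERDICT (by name: the statement is the Claim_ definition above) =====
theorem group_together_tuples_spec : Claim_equal_group_together_tuples := by
  intro lst _
  show group_together_tuples lst = group_together_tuples_alt lst
  unfold group_together_tuples group_together_tuples_alt
  exact (pvTop (pvAdj lst) (pvAdj lst).keys
    (fun v hv => by unfold pvAllV; exact List.mem_append_left _ hv)
    PySem.Set.empty PySem.Dict.empty []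
    (fun k' hk' => by simp at hk')
    (by rfl)).2
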